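-- pv_equiv track=rewrite | github.com/dgsim126/Algo_Study_2 | Programmers/김선엽/2504/250402/무한 문자열.py | solution
-- ===== SOURCE A (Python) =====
-- def solution(S, T):
--     len_s = len(S)
--     len_t = len(T)
--
--     i_s = 0
--     i_t = 0
--
--     if S[i_s] != T[i_t]:
--         return False
--
--     while True:
--         i_s += 1
--         i_t += 1
--
--         if i_s == len_s - 1 and i_t == len_t - 1:
--             if S[i_s] != T[i_t]:
--                 return False
--             return True
--
--         if i_s >= len_s:
--             i_s = 0
--         if i_t >= len_t:
--             i_t = 0
--
--         if S[i_s] != T[i_t]: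
--             return False
-- ===== SOURCE B (Python) =====
-- def solution(S, T):
--     # Infinite repetitions of S and T coincide iff S and T commute as words.
--     return S + T == T + S
-- ===== Notes on version B (the rewrite author's own statement) =====
-- stated objective: faster
-- what changed: Replaces A's character-by-character walk with two wrap-around cursors and a hand-rolled stop test at position lcm(|S|,|T|)-1 by the one-line word-commutation criterion S + T == T + S (infinite repetitions agree iff S and T commute).
import Mathlib
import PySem

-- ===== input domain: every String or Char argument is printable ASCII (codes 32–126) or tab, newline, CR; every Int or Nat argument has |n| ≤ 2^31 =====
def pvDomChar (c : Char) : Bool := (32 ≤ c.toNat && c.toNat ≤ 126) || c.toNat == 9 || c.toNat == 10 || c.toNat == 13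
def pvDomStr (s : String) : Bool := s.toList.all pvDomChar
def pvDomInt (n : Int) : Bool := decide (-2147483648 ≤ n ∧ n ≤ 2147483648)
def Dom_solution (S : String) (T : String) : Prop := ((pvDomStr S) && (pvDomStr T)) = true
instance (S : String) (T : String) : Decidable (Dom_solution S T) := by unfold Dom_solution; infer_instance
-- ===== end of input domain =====

-- B replaces A's two-cursor character walk over lcm(|S|,|T|) positions by the word-commutation
-- test S + T == T + S (one comparison of two strings of length |S|+|T|). Return values only; no mutation.

-- ===== PORT A =====
-- Python indexing xs[i]: every index reached inside Pre_solution is in range (Pre_ excludes the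
-- empty strings, where A's S[0]/T[0] raises IndexError), so getD's default is never returned there.
def pvIdx (xs : List Char) (i : Nat) : Char := xs.getD i ' '

-- A's 'while True' loop. Fuel n*m+1 bounds the iterations A performs before returning on every
-- input admitted by Pre_solution (A returns by step lcm(n,m)-1 ≤ n*m, or at an earlier mismatch);
-- on the inputs Pre_ excludes, A diverges, and the fuel-0 value is never compared to anything.
def pvLoopA (ls lt : List Char) (n m : Nat) : Nat → Nat → Nat → Bool
  | 0, _, _ => false
  | fuel+1, is0, it0 =>
    let is := is0 + 1
    let it := it0 + 1
    if is = n - 1 ∧ it = m - 1 then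
      pvIdx ls is == pvIdx lt it
    else
      let is' := if is ≥ n then 0 else is
      let it' := if it ≥ m then 0 else it
      if pvIdx ls is' ≠ pvIdx lt it' then false
      else pvLoopA ls lt n m fuel is' it'

def solution (S : String) (T : String) : Bool :=
  let ls := S.toList
  let lt := T.toList
  let n := ls.length
  let m := lt.length
  if pvIdx ls 0 ≠ pvIdx lt 0 then false
  else pvLoopA ls lt n m (n * m + 1) 0 0

-- ===== PORT B =====
def solution_alt (S : String) (T : String) : Bool :=
  (S.toList ++ T.toList) == (T.toList ++ S.toList)

-- ===== PRECONDITION & SPEC =====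
-- Pre_ excludes exactly the inputs on which A does not return: empty S or T (A's S[0]/T[0] raises
-- IndexError), and the inputs where |S| = 1 and T consists solely of S's character (symmetrically
-- |T| = 1), on which A's stop test 'i_s == len_s - 1' never fires and A loops forever.
def Pre_solution (S : String) (T : String) : Prop :=
  S.toList ≠ [] ∧ T.toList ≠ [] ∧
  ¬(S.toList.length = 1 ∧ ∀ c ∈ T.toList, c = S.toList.getD 0 ' ') ∧
  ¬(T.toList.length = 1 ∧ ∀ c ∈ S.toList, c = T.toList.getD 0 ' ')
instance (S : String) (T : String) : Decidable (Pre_solution S T) := by unfold Pre_solution; infer_instance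

def pvWitness_solution : String × String := ("ab", "abab")

def Spec_solution (S : String) (T : String) (out : Bool) : Prop := out = solution_alt S T
instance (S : String) (T : String) (out : Bool) : Decidable (Spec_solution S T out) := by unfold Spec_solution; infer_instance

-- ===== CLAIM (what is proved, stated in full; the proofs are below) =====
def Claim_equal_solution : Prop := ∀ (S : String) (T : String), Dom_solution S T → Pre_solution S T → Spec_solution S T (solution S T)

-- ===== LEMMAS AND PROOFS =====

-- character of the infinite repetition of ls at position j
def pvF (ls : List Char) (j : Nat) : Char := ls.getD (j % ls.length) ' '

-- the written-out wrap step 'if i+1 >= n then 0 else i+1' on i = k % n is (k+1) % n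
theorem pv_wrap (n k : Nat) (hn : 0 < n) :
    (if k % n + 1 ≥ n then 0 else k % n + 1) = (k + 1) % n := by
  have h1 : k % n < n := Nat.mod_lt k hn
  have h2 : (k + 1) % n = (k % n + 1) % n :=
    (Nat.ModEq.add_right 1 (Nat.mod_modEq k n)).symm
  rcases Nat.lt_or_ge (k % n + 1) n with h | h
  · rw [if_neg (by omega), h2, Nat.mod_eq_of_lt h]
  · have : k % n + 1 = n := by omega
    rw [if_pos h, h2, this, Nat.mod_self]

-- one side of A's stop test is a divisibility statement
theorem pv_stop_one (n k : Nat) (h2 : 2 ≤ n) : k % n + 1 = n - 1 ↔ n ∣ (k + 2) := by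
  have hd := Nat.div_add_mod k n
  constructor
  · intro h
    refine ⟨k / n + 1, ?_⟩
    have : n * (k / n + 1) = n * (k / n) + n := by ring
    omega
  · rintro ⟨c, hc⟩
    rcases c with _ | c
    · omega
    · have hc' : k = n * c + (n - 2) := by
        have : n * (c + 1) = n * c + n := by ring
        omega
      have : k % n = n - 2 := by
        rw [hc', Nat.mul_add_mod, Nat.mod_eq_of_lt (by omega)]
      omega

theorem pv_last_mod (n L : Nat) (h2 : 2 ≤ n) (hd : n ∣ L) (hL : 0 < L) : (L - 1) % n = n - 1 := by
  rcases hd with ⟨a, ha⟩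
  rcases a with _ | a
  · omega
  · have h1 : L - 1 = n * a + (n - 1) := by
      have : n * (a + 1) = n * a + n := by ring
      omega
    rw [h1, Nat.mul_add_mod, Nat.mod_eq_of_lt (by omega)]

theorem pv_beq_char (a b : Char) : (a == b) = decide (a = b) := by
  by_cases h : a = b <;> simp [h]

-- characterisation of A's loop when both lengths are ≥ 2: it decides pointwise agreement
-- of the two infinite repetitions on the positions k+1 … lcm-1
theorem pvLoopA_eq (ls lt : List Char) (n m : Nat) (hn : ls.length = n) (hm : lt.length = m)
    (h2n : 2 ≤ n) (h2m : 2 ≤ m) :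
    ∀ (fuel k : Nat), k ≤ Nat.lcm n m - 2 → Nat.lcm n m - 1 - k ≤ fuel →
      pvLoopA ls lt n m fuel (k % n) (k % m)
        = decide (∀ j < Nat.lcm n m, k < j → pvF ls j = pvF lt j) := by
  have hFs : ∀ j, pvF ls j = pvIdx ls (j % n) := by intro j; simp [pvF, pvIdx, hn]
  have hFt : ∀ j, pvF lt j = pvIdx lt (j % m) := by intro j; simp [pvF, pvIdx, hm]
  have hnL : n ∣ Nat.lcm n m := Nat.dvd_lcm_left n m
  have hmL : m ∣ Nat.lcm n m := Nat.dvd_lcm_right n m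
  have hLpos : 0 < Nat.lcm n m := Nat.lcm_pos (by omega) (by omega)
  have hLn : n ≤ Nat.lcm n m := Nat.le_of_dvd hLpos hnL
  intro fuel
  induction fuel with
  | zero => intro k hk hf; exact absurd rfl (by omega : ¬(0 = 0))
  | succ fuel ih =>
    intro k hk hf
    rw [pvLoopA]
    by_cases hstop : k % n + 1 = n - 1 ∧ k % m + 1 = m - 1
    · rw [if_pos hstop]
      have hdL : Nat.lcm n m ∣ k + 2 :=
        Nat.lcm_dvd ((pv_stop_one n k h2n).mp hstop.1) ((pv_stop_one m k h2m).mp hstop.2)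
      have hkL : k + 2 = Nat.lcm n m := le_antisymm (by omega) (Nat.le_of_dvd (by omega) hdL)
      have h1 : pvIdx ls (k % n + 1) = pvF ls (k + 1) := by
        rw [hFs]
        congr 1
        rw [hstop.1]
        have he : k + 1 = Nat.lcm n m - 1 := by omega
        rw [he, pv_last_mod n _ h2n hnL hLpos]
      have h2 : pvIdx lt (k % m + 1) = pvF lt (k + 1) := by
        rw [hFt]
        congr 1
        rw [hstop.2]
        have he : k + 1 = Nat.lcm n m - 1 := by omega
        rw [he, pv_last_mod m _ h2m hmL hLpos]
      rw [h1, h2, pv_beq_char, decide_eq_decide]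
      constructor
      · intro h j hjL hkj
        have : j = k + 1 := by omega
        rwa [this]
      · intro h
        exact h (k + 1) (by omega) (by omega)
    · rw [if_neg hstop]
      have hk2 : k + 2 < Nat.lcm n m := by
        rcases eq_or_lt_of_le (show k + 2 ≤ Nat.lcm n m by omega) with he | h
        · exact absurd ⟨(pv_stop_one n k h2n).mpr (he ▸ hnL),
                        (pv_stop_one m k h2m).mpr (he ▸ hmL)⟩ hstop
        · exact h
      rw [pv_wrap n k (by omega), pv_wrap m k (by omega)]
      by_cases hEq : pvIdx ls ((k + 1) % n) ≠ pvIdx lt ((k + 1) % m)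
      · rw [if_pos hEq]
        symm
        rw [decide_eq_false_iff_not]
        intro hall
        exact hEq (by rw [← hFs, ← hFt]; exact hall (k + 1) (by omega) (by omega))
      · rw [if_neg hEq]
        rw [ih (k + 1) (by omega) (by omega), decide_eq_decide]
        have hkk : pvF ls (k + 1) = pvF lt (k + 1) := by
          rw [hFs, hFt]; exact not_not.mp hEq
        constructor
        · intro h j hjL hkj
          rcases eq_or_lt_of_le (Nat.succ_le_of_lt hkj) with he | hlt
          · rw [← he]; exact hkk
          · exact h j hjL hlt
        · intro h j hjL hkj
          exact h j hjL (by omega)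

-- A's loop returns false when some length is 1 and a mismatch exists (the stop test never fires)
theorem pvLoopA_false (ls lt : List Char) (n m : Nat) (hn : ls.length = n) (hm : lt.length = m)
    (h1n : 1 ≤ n) (h1m : 1 ≤ m) (hone : n = 1 ∨ m = 1) :
    ∀ (fuel k j₀ : Nat), k < j₀ → j₀ ≤ k + fuel →
      (∀ j, k < j → j < j₀ → pvF ls j = pvF lt j) → pvF ls j₀ ≠ pvF lt j₀ →
      pvLoopA ls lt n m fuel (k % n) (k % m) = false := by
  have hFs : ∀ j, pvF ls j = pvIdx ls (j % n) := by intro j; simp [pvF, pvIdx, hn]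
  have hFt : ∀ j, pvF lt j = pvIdx lt (j % m) := by intro j; simp [pvF, pvIdx, hm]
  intro fuel
  induction fuel with
  | zero => intro k j₀ h1 h2 _ _; omega
  | succ fuel ih =>
    intro k j₀ hkj hj hprev hmis
    rw [pvLoopA]
    have hstop : ¬(k % n + 1 = n - 1 ∧ k % m + 1 = m - 1) := by
      rcases hone with rfl | rfl
      · rintro ⟨h, -⟩; omega
      · rintro ⟨-, h⟩; omega
    rw [if_neg hstop, pv_wrap n k (by omega), pv_wrap m k (by omega)]
    by_cases hEq : pvIdx ls ((k + 1) % n) ≠ pvIdx lt ((k + 1) % m)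
    · rw [if_pos hEq]
    · rw [if_neg hEq]
      rcases eq_or_lt_of_le (Nat.succ_le_of_lt hkj) with he | hlt
      · exact absurd (by rw [hFs, hFt, ← he]; simpa using hEq) hmis
      · exact ih (k + 1) j₀ hlt (by omega) (fun j hj1 hj2 => hprev j (by omega) hj2) hmis

theorem pv_sub_mod (n i : Nat) (h : n ≤ i) : (i - n) % n = i % n := by
  obtain ⟨d, rfl⟩ : ∃ d, i = n + d := ⟨i - n, by omega⟩
  rw [Nat.add_sub_cancel_left, Nat.add_mod_left]

-- pointwise value of ls ++ lt when the infinite repetitions agree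
theorem pv_append_getElem (ls lt : List Char) (hls : ls ≠ [])
    (hagree : ∀ j, pvF ls j = pvF lt j) (i : Nat) (hi : i < (ls ++ lt).length) :
    (ls ++ lt)[i] = pvF ls i := by
  have hn : 0 < ls.length := List.length_pos_of_ne_nil hls
  simp only [List.length_append] at hi
  rcases Nat.lt_or_ge i ls.length with h | h
  · rw [List.getElem_append_left h, pvF, Nat.mod_eq_of_lt h, List.getD_eq_getElem _ _ h]
  · rw [List.getElem_append_right h]
    have him : i - ls.length < lt.length := by omega
    have h1 : lt[i - ls.length] = pvF lt (i - ls.length) := by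
      rw [pvF, Nat.mod_eq_of_lt him, List.getD_eq_getElem _ _ him]
    rw [h1, ← hagree (i - ls.length), pvF, pvF, pv_sub_mod _ _ h]

-- the hard direction of the word-commutation criterion, for |ls| ≤ |lt|
theorem pv_agree_of_comm_le (ls lt : List Char) (hls : ls ≠ []) (hlt : lt ≠ [])
    (hnm : ls.length ≤ lt.length) (h : ls ++ lt = lt ++ ls) :
    ∀ j, pvF ls j = pvF lt j := by
  have hn : 0 < ls.length := List.length_pos_of_ne_nil hls
  have hm : 0 < lt.length := List.length_pos_of_ne_nil hlt
  set n := ls.length with hndef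
  set m := lt.length with hmdef
  have heq : ∀ i (h1 : i < n + m), (ls ++ lt)[i]'(by simpa [List.length_append] using h1)
      = (lt ++ ls)[i]'(by simp [List.length_append]; omega) := by
    intro i h1
    exact List.getElem_of_eq h _
  have ha : ∀ i, i < n → ls.getD i ' ' = lt.getD i ' ' := by
    intro i hi
    have := heq i (by omega)
    rw [List.getElem_append_left (by omega), List.getElem_append_left (by omega)] at this
    rw [List.getD_eq_getElem _ _ (by omega), List.getD_eq_getElem _ _ (by omega)]
    exact this
  have hb : ∀ i, n ≤ i → i < m → lt.getD i ' ' = lt.getD (i - n) ' ' := by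
    intro i hni him
    have := heq i (by omega)
    rw [List.getElem_append_right (by omega), List.getElem_append_left (by omega)] at this
    rw [List.getD_eq_getElem _ _ (by omega), List.getD_eq_getElem _ _ (by omega : i - n < m)]
    exact this.symm
  have hc : ∀ d, d < n → lt.getD (m - n + d) ' ' = ls.getD d ' ' := by
    intro d hd
    have := heq (m + d) (by omega)
    rw [List.getElem_append_right (by omega : n ≤ m + d),
        List.getElem_append_right (by omega : m ≤ m + d)] at this
    rw [List.getD_eq_getElem _ _ (by omega : m - n + d < m),
        List.getD_eq_getElem _ _ (by omega : d < n)]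
    simp only [show m + d - ls.length = m - n + d from by omega,
               show m + d - lt.length = d from by omega] at this
    exact this
  have hstep : ∀ i, i < m → lt.getD ((i + n) % m) ' ' = lt.getD i ' ' := by
    intro i him
    rcases Nat.lt_or_ge (i + n) m with hc1 | hc1
    · rw [Nat.mod_eq_of_lt hc1, hb (i + n) (by omega) hc1, Nat.add_sub_cancel]
    · have hd : i + n - m < n := by omega
      have hmod : (i + n) % m = i + n - m := by
        rw [Nat.mod_eq_sub_mod hc1, Nat.mod_eq_of_lt (by omega)]
      rw [hmod]
      have e1 : m - n + (i + n - m) = i := by omega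
      calc lt.getD (i + n - m) ' ' = ls.getD (i + n - m) ' ' := (ha _ hd).symm
        _ = lt.getD (m - n + (i + n - m)) ' ' := (hc _ hd).symm
        _ = lt.getD i ' ' := by rw [e1]
  have hper : ∀ j, lt.getD ((j + n) % m) ' ' = lt.getD (j % m) ' ' := by
    intro j
    have h1 : (j % m + n) % m = (j + n) % m :=
      (Nat.ModEq.add_right n (Nat.mod_modEq j m))
    rw [← h1, hstep (j % m) (Nat.mod_lt j hm)]
  have hred : ∀ j, lt.getD (j % m) ' ' = lt.getD (j % n) ' ' := by
    intro j
    induction j using Nat.strong_induction_on with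
    | _ j ih =>
      rcases Nat.lt_or_ge j n with hj | hj
      · rw [Nat.mod_eq_of_lt hj, Nat.mod_eq_of_lt (by omega : j < m)]
      · obtain ⟨d, rfl⟩ : ∃ d, j = d + n := ⟨j - n, by omega⟩
        rw [hper d, ih d (by omega), ← pv_sub_mod n (d + n) (by omega), Nat.add_sub_cancel]
  intro j
  have hjn : j % n < n := Nat.mod_lt j hn
  calc pvF ls j = ls.getD (j % n) ' ' := rfl
    _ = lt.getD (j % n) ' ' := ha _ hjn
    _ = lt.getD (j % m) ' ' := (hred j).symm
    _ = pvF lt j := rfl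

-- two nonempty words commute iff their infinite repetitions agree pointwise
theorem pv_append_comm_iff (ls lt : List Char) (hls : ls ≠ []) (hlt : lt ≠ []) :
    ls ++ lt = lt ++ ls ↔ ∀ j, pvF ls j = pvF lt j := by
  constructor
  · intro h
    rcases Nat.lt_or_ge lt.length ls.length with hle | hle
    · exact fun j => (pv_agree_of_comm_le lt ls hlt hls (by omega) h.symm j).symm
    · exact pv_agree_of_comm_le ls lt hls hlt hle h
  · intro hagree
    apply List.ext_getElem (by simp [Nat.add_comm])
    intro i h1 h2
    rw [pv_append_getElem ls lt hls hagree i h1,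
        pv_append_getElem lt ls hlt (fun j => (hagree j).symm) i h2]
    exact hagree i

-- agreement below lcm suffices
theorem pv_lcm_agree (ls lt : List Char) (hls : ls ≠ []) (hlt : lt ≠ []) :
    (∀ j, j < Nat.lcm ls.length lt.length → pvF ls j = pvF lt j) ↔ ∀ j, pvF ls j = pvF lt j := by
  have hn : 0 < ls.length := List.length_pos_of_ne_nil hls
  have hm : 0 < lt.length := List.length_pos_of_ne_nil hlt
  have hLpos : 0 < Nat.lcm ls.length lt.length := Nat.lcm_pos hn hm
  constructor
  · intro h j
    have h1 : pvF ls j = pvF ls (j % Nat.lcm ls.length lt.length) := by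
      rw [pvF, pvF, Nat.mod_mod_of_dvd j (Nat.dvd_lcm_left _ _)]
    have h2 : pvF lt j = pvF lt (j % Nat.lcm ls.length lt.length) := by
      rw [pvF, pvF, Nat.mod_mod_of_dvd j (Nat.dvd_lcm_right _ _)]
    rw [h1, h2]
    exact h _ (Nat.mod_lt j hLpos)
  · exact fun h j _ => h j

theorem pv_beq_list (a b : List Char) : (a == b) = decide (a = b) := by
  by_cases h : a = b <;> simp [h]

-- ===== VERDICT (by name: the statement is the Claim_ definition above) =====
theorem solution_spec : Claim_equal_solution := by
  intro S T _ hpre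
  obtain ⟨hls, hlt, hpre1, hpre2⟩ := hpre
  have hn : 0 < S.toList.length := List.length_pos_of_ne_nil hls
  have hm : 0 < T.toList.length := List.length_pos_of_ne_nil hlt
  have hBiff : (S.toList ++ T.toList = T.toList ++ S.toList) ↔
      ∀ j, pvF S.toList j = pvF T.toList j := pv_append_comm_iff _ _ hls hlt
  have hB : solution_alt S T = decide (S.toList ++ T.toList = T.toList ++ S.toList) := by
    rw [solution_alt, pv_beq_list]
  show solution S T = solution_alt S T
  rw [solution]
  by_cases h0 : pvIdx S.toList 0 ≠ pvIdx T.toList 0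
  · rw [if_pos h0, hB]
    symm
    rw [decide_eq_false_iff_not]
    intro hall
    have := hBiff.mp hall 0
    exact h0 (by simpa [pvF, pvIdx, Nat.mod_eq_of_lt hn, Nat.mod_eq_of_lt hm] using this)
  · have h0' : pvF S.toList 0 = pvF T.toList 0 := by
      simpa [pvF, pvIdx, Nat.mod_eq_of_lt hn, Nat.mod_eq_of_lt hm] using not_not.mp h0
    rw [if_neg h0]
    by_cases hone : S.toList.length = 1 ∨ T.toList.length = 1
    · -- a mismatch exists by Pre_; A's loop hits it, B compares unequal words
      have hex : ∃ j, pvF S.toList j ≠ pvF T.toList j ∧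
          j ≤ S.toList.length * T.toList.length := by
        rcases hone with h1 | h1
        · have := hpre1
          rw [not_and] at this
          have hx := this h1
          push Not at hx
          obtain ⟨c, hcmem, hcne⟩ := hx
          obtain ⟨i, hi, rfl⟩ := List.mem_iff_getElem.mp hcmem
          refine ⟨i, ?_, by nlinarith⟩
          rw [pvF, pvF, h1, Nat.mod_one, Nat.mod_eq_of_lt hi, List.getD_eq_getElem _ _ hi]
          exact fun he => hcne he.symm
        · have := hpre2
          rw [not_and] at this
          have hx := this h1
          push Not at hx
          obtain ⟨c, hcmem, hcne⟩ := hx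
          obtain ⟨i, hi, rfl⟩ := List.mem_iff_getElem.mp hcmem
          refine ⟨i, ?_, by nlinarith⟩
          rw [pvF, pvF, h1, Nat.mod_one, Nat.mod_eq_of_lt hi, List.getD_eq_getElem _ _ hi]
          exact hcne
      have hexP : ∃ j, pvF S.toList j ≠ pvF T.toList j := ⟨hex.choose, hex.choose_spec.1⟩
      have hj0pos : 0 < Nat.find hexP := by
        rw [Nat.pos_iff_ne_zero]
        intro hz
        exact (hz ▸ Nat.find_spec hexP) h0'
      have hj0le : Nat.find hexP ≤ S.toList.length * T.toList.length :=
        le_trans (Nat.find_min' hexP hex.choose_spec.1) hex.choose_spec.2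
      have hA : pvLoopA S.toList T.toList S.toList.length T.toList.length
          (S.toList.length * T.toList.length + 1) 0 0 = false := by
        have := pvLoopA_false S.toList T.toList S.toList.length T.toList.length rfl rfl hn hm
          hone (S.toList.length * T.toList.length + 1) 0 (Nat.find hexP) hj0pos (by omega)
          (fun j hj1 hj2 => not_not.mp (Nat.find_min hexP hj2))
          (Nat.find_spec hexP)
        simpa using this
      rw [hA, hB]
      symm
      rw [decide_eq_false_iff_not]
      intro hall
      exact Nat.find_spec hexP (hBiff.mp hall _)
    · push Not at hone
      have h2n : 2 ≤ S.toList.length := by omega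
      have h2m : 2 ≤ T.toList.length := by omega
      have hfuel : Nat.lcm S.toList.length T.toList.length ≤
          S.toList.length * T.toList.length :=
        Nat.le_of_dvd (by positivity)
          (Nat.lcm_dvd (dvd_mul_right _ _) (dvd_mul_left _ _))
      have hA := pvLoopA_eq S.toList T.toList S.toList.length T.toList.length rfl rfl h2n h2m
        (S.toList.length * T.toList.length + 1) 0 (by omega) (by omega)
      simp only [Nat.zero_mod] at hA
      rw [hA, hB, decide_eq_decide]
      rw [hBiff, ← pv_lcm_agree S.toList T.toList hls hlt]
      constructor
      · intro h j hjL
        rcases Nat.eq_zero_or_pos j with rfl | hj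
        · exact h0'
        · exact h j hjL hj
      · intro h j hjL _
        exact h j hjL
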